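-- pv_equiv track=rewrite | github.com/sankakusango/arxiv-translator | src/arxiv_translator/tex_translator_utils.py | split_tex_into_subsubsections
-- ===== SOURCE A (Python) =====
-- def split_tex_contents(content: str, flag=r"\section") -> list:
--     """受け取ったcontentsをflagで分割, 前にくっつける.
--
--     Args:
--         contents (str): 入力テキスト
--         flag (regexp, optional): 分割フラグ. Defaults to r"\\section".
--
--     Returns:
--         list: 分割されたテキスト
--     """
--
--     parts: list = content.split(flag)
--     results: list=[parts[0]]
--     for part in parts[1:]:
--         results.append(flag+part)
--     return results
--
-- def split_tex_into_subsubsections(contents: str) -> list: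
--     """texのコンテンツをsubsubsectionに分割してリストにする.
--
--     Args:
--         contents (str): texファイルの中身
--
--     Returns:
--         list: subsubsectionのリスト
--     """
--
--     sections = split_tex_contents(content=contents, flag=r"\section")
--
--     subsections = []
--     for section in sections:
--         subsections += split_tex_contents(content=section, flag=r"\subsection")
--
--     subsubsections = []
--     for subsection in subsections:
--         subsubsections += split_tex_contents(content=subsection, flag=r"\subsubsection")
--
--     return subsubsections
-- ===== SOURCE B (Python) =====
-- def split_tex_into_subsubsections(contents: str) -> list:
--     """Single left-to-right scan: whenever one of the three section markers
--     starts at the current position, close the current chunk and start a new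
--     one with that marker; one pass instead of three split/concat passes."""
--     markers = ("\\subsubsection", "\\subsection", "\\section")
--     results = []
--     cur = ""
--     i = 0
--     n = len(contents)
--     while i < n:
--         for m in markers:
--             if contents.startswith(m, i):
--                 results.append(cur)
--                 cur = m
--                 i += len(m)
--                 break
--         else:
--             cur += contents[i]
--             i += 1
--     results.append(cur)
--     return results
-- ===== Notes on version B (the rewrite author's own statement) =====
-- stated objective: alternative
-- what changed: A splits by \section, then re-splits every piece by \subsection, then by \subsubsection (three split/re-concat passes); B makes one left-to-right scan over the string, closing the current chunk whenever one of the three markers starts at the current position.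
import Mathlib
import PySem

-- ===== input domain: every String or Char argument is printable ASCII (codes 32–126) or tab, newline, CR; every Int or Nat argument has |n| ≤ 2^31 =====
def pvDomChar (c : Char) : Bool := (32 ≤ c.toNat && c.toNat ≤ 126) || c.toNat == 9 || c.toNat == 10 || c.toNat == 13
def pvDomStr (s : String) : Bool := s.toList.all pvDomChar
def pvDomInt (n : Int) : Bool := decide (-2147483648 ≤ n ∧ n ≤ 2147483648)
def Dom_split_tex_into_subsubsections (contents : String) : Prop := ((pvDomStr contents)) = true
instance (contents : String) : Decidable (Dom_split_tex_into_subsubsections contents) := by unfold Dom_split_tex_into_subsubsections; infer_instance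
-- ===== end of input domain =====

-- B replaces A's three split/re-concat passes by one left-to-right scan that closes a
-- chunk whenever one of the three markers starts at the current position (objective: alternative).

-- the three literal TeX markers, as character lists (strings are ported on List Char)
def pvSec : List Char := ['\\', 's', 'e', 'c', 't', 'i', 'o', 'n']
def pvSub : List Char := ['\\', 's', 'u', 'b', 's', 'e', 'c', 't', 'i', 'o', 'n']
def pvSubsub : List Char := ['\\', 's', 'u', 'b', 's', 'u', 'b', 's', 'e', 'c', 't', 'i', 'o', 'n']

-- ===== PORT A =====
-- split_tex_contents: parts = content.split(flag); results = [parts[0]]; for part in parts[1:]: results.append(flag+part)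
-- (parts[0] is ported as headD []: Python's split always returns a non-empty list, so parts[0] never raises)
def split_tex_contents (content : List Char) (flag : List Char) : List (List Char) :=
  let parts := PySem.Chars.splitOn content flag
  (parts.drop 1).foldl (fun results part => results ++ [flag ++ part]) [parts.headD []]

def split_tex_into_subsubsections (contents : String) : List String :=
  let sections := split_tex_contents contents.toList pvSec
  let subsections := sections.foldl (fun acc s => acc ++ split_tex_contents s pvSub) []
  let subsubsections := subsections.foldl (fun acc s => acc ++ split_tex_contents s pvSubsub) []
  subsubsections.map String.ofList

-- ===== PORT B =====
-- the while loop of Source B: l is the rest of contents from position i; cur and results as in Source B;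
-- the for/break over markers is the if-chain (longest marker first), contents.startswith(m, i) is startswith on the rest
def pvScan (l : List Char) (cur : List Char) (results : List (List Char)) : List (List Char) :=
  match l with
  | [] => results ++ [cur]
  | c :: rest =>
    if PySem.Chars.startswith (c :: rest) pvSubsub then
      pvScan (rest.drop 13) pvSubsub (results ++ [cur])
    else if PySem.Chars.startswith (c :: rest) pvSub then
      pvScan (rest.drop 10) pvSub (results ++ [cur])
    else if PySem.Chars.startswith (c :: rest) pvSec then
      pvScan (rest.drop 7) pvSec (results ++ [cur])
    else
      pvScan rest (cur ++ [c]) results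
termination_by l.length
decreasing_by all_goals (simp [List.length_drop]; try omega)

def split_tex_into_subsubsections_alt (contents : String) : List String :=
  (pvScan contents.toList [] []).map String.ofList

-- ===== PRECONDITION & SPEC =====
def Spec_split_tex_into_subsubsections (contents : String) (out : List String) : Prop := out = split_tex_into_subsubsections_alt contents
instance (contents : String) (out : List String) : Decidable (Spec_split_tex_into_subsubsections contents out) := by unfold Spec_split_tex_into_subsubsections; infer_instance

-- ===== CLAIM (what is proved, stated in full; the proofs are below) =====
def Claim_equal_split_tex_into_subsubsections : Prop := ∀ (contents : String), Dom_split_tex_into_subsubsections contents → Spec_split_tex_into_subsubsections contents (split_tex_into_subsubsections contents)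

-- ===== LEMMAS AND PROOFS =====

-- raw fueled splitter: mirrors PySem.Chars.splitOn.go without the accumulators
def pvRsp (sep : List Char) : Nat → List Char → List Char × List (List Char)
  | 0, l => (l, [])
  | _ + 1, [] => ([], [])
  | f + 1, c :: rest =>
    if sep.isPrefixOf (c :: rest) then
      (([] : List Char),
        (pvRsp sep f ((c :: rest).drop sep.length)).1 :: (pvRsp sep f ((c :: rest).drop sep.length)).2)
    else
      (c :: (pvRsp sep f rest).1, (pvRsp sep f rest).2)

-- chunks of `splitKeep` (split by flag, re-attach flag), head/tail form
def pvSk (m l : List Char) : List (List Char) :=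
  (pvRsp m (l.length + 1) l).1 :: ((pvRsp m (l.length + 1) l).2).map (m ++ ·)

-- fueled multi-marker chunker (first matching marker in M starts a new chunk, marker kept)
def pvGch (M : List (List Char)) : Nat → List Char → List Char × List (List Char)
  | 0, l => (l, [])
  | _ + 1, [] => ([], [])
  | f + 1, c :: rest =>
    match M.find? (·.isPrefixOf (c :: rest)) with
    | some m =>
      (([] : List Char),
        (m ++ (pvGch M f ((c :: rest).drop m.length)).1) :: (pvGch M f ((c :: rest).drop m.length)).2)
    | none => (c :: (pvGch M f rest).1, (pvGch M f rest).2)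

lemma pvGo_eq_rsp (sep : List Char) :
    ∀ (fuel : Nat) (l cur : List Char) (acc : List (List Char)),
      PySem.Chars.splitOn.go sep fuel l cur acc =
        acc.reverse ++ (cur.reverse ++ (pvRsp sep fuel l).1) :: (pvRsp sep fuel l).2 := by
  intro fuel
  induction fuel with
  | zero => intro l cur acc; simp [PySem.Chars.splitOn.go, pvRsp]
  | succ f ih =>
    intro l cur acc
    cases l with
    | nil => simp [PySem.Chars.splitOn.go, pvRsp]
    | cons c rest =>
      by_cases h : sep.isPrefixOf (c :: rest)
      · simp only [PySem.Chars.splitOn.go, pvRsp, h, if_true, ih]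
        simp
      · simp only [PySem.Chars.splitOn.go, pvRsp, h, if_false, ih, Bool.false_eq_true]
        simp

lemma pvSplitOn_eq (l sep : List Char) :
    PySem.Chars.splitOn l sep = (pvRsp sep (l.length + 1) l).1 :: (pvRsp sep (l.length + 1) l).2 := by
  simp [PySem.Chars.splitOn, pvGo_eq_rsp]

lemma pvStc_eq (content flag : List Char) : split_tex_contents content flag = pvSk flag content := by
  unfold split_tex_contents pvSk
  rw [pvSplitOn_eq]
  simp
  generalize (pvRsp flag (content.length + 1) content).2 = t
  induction t with
  | nil => simp
  | cons a t ih => simp [ih]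

lemma pvRsp_stable (sep : List Char) (hsep : sep ≠ []) :
    ∀ (f f' : Nat) (l : List Char), l.length ≤ f → l.length ≤ f' → pvRsp sep f l = pvRsp sep f' l := by
  have hsl : 1 ≤ sep.length := by
    cases sep with
    | nil => exact absurd rfl hsep
    | cons a s => simp
  intro f
  induction f with
  | zero =>
    intro f' l hf _
    have : l = [] := List.eq_nil_of_length_eq_zero (Nat.le_zero.mp hf)
    subst this
    cases f' <;> simp [pvRsp]
  | succ f ih =>
    intro f' l hf hf'
    cases l with
    | nil => cases f' <;> simp [pvRsp]
    | cons c rest =>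
      cases f' with
      | zero => simp at hf'
      | succ f'' =>
        simp only [pvRsp]
        by_cases h : sep.isPrefixOf (c :: rest)
        · simp only [h, if_true]
          rw [ih f'' ((c :: rest).drop sep.length) (by simp at hf ⊢; omega) (by simp at hf' ⊢; omega)]
        · simp only [h, Bool.false_eq_true, if_false]
          rw [ih f'' rest (by simp at hf ⊢; omega) (by simp at hf' ⊢; omega)]

lemma pvGch_stable (M : List (List Char)) (hM : ∀ m ∈ M, m ≠ []) :
    ∀ (f f' : Nat) (l : List Char), l.length ≤ f → l.length ≤ f' → pvGch M f l = pvGch M f' l := by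
  intro f
  induction f with
  | zero =>
    intro f' l hf _
    have : l = [] := List.eq_nil_of_length_eq_zero (Nat.le_zero.mp hf)
    subst this
    cases f' <;> simp [pvGch]
  | succ f ih =>
    intro f' l hf hf'
    cases l with
    | nil => cases f' <;> simp [pvGch]
    | cons c rest =>
      cases f' with
      | zero => simp at hf'
      | succ f'' =>
        simp only [pvGch]
        cases hfind : List.find? (·.isPrefixOf (c :: rest)) M with
        | some m =>
          have hmem := List.mem_of_find?_eq_some hfind
          have hml : 1 ≤ m.length := by
            cases hm : m with
            | nil => exact absurd hm (hM m hmem)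
            | cons a s => simp
          dsimp only
          rw [ih f'' ((c :: rest).drop m.length) (by simp at hf ⊢; omega) (by simp at hf' ⊢; omega)]
        | none =>
          dsimp only
          rw [ih f'' rest (by simp at hf ⊢; omega) (by simp at hf' ⊢; omega)]

lemma pvGch_single (m : List Char) :
    ∀ (f : Nat) (l : List Char),
      pvGch [m] f l = ((pvRsp m f l).1, (pvRsp m f l).2.map (m ++ ·)) := by
  intro f
  induction f with
  | zero => intro l; simp [pvGch, pvRsp]
  | succ f ih =>
    intro l
    cases l with
    | nil => simp [pvGch, pvRsp]
    | cons c rest =>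
      by_cases h : m.isPrefixOf (c :: rest)
      · simp [pvGch, pvRsp, List.find?, h, ih]
      · simp [pvGch, pvRsp, List.find?, h, ih]

lemma pvGch_fst_prefix (M : List (List Char)) :
    ∀ (f : Nat) (l : List Char), (pvGch M f l).1 <+: l := by
  intro f
  induction f with
  | zero => intro l; simp [pvGch]
  | succ f ih =>
    intro l
    cases l with
    | nil => simp [pvGch]
    | cons c rest =>
      simp only [pvGch]
      cases hfind : List.find? (·.isPrefixOf (c :: rest)) M with
      | some m => simp
      | none => exact List.cons_prefix_cons.mpr ⟨rfl, ih rest⟩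

lemma pvGch_skip (M : List (List Char)) :
    ∀ (k : Nat) (l : List Char) (f : Nat),
      (∀ p < k, ∀ m ∈ M, ¬ m <+: l.drop p) → k ≤ l.length → k ≤ f →
      pvGch M f l = (l.take k ++ (pvGch M (f - k) (l.drop k)).1, (pvGch M (f - k) (l.drop k)).2) := by
  intro k
  induction k with
  | zero => intro l f _ _ _; simp
  | succ k ih =>
    intro l f hno hkl hkf
    cases l with
    | nil => simp at hkl
    | cons c rest =>
      cases f with
      | zero => omega
      | succ f' =>
        have h0 : ∀ m ∈ M, ¬ m <+: (c :: rest) := by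
          intro m hm
          simpa using hno 0 (Nat.succ_pos k) m hm
        have hfind : List.find? (·.isPrefixOf (c :: rest)) M = none := by
          rw [List.find?_eq_none]
          intro m hm
          rw [Bool.not_eq_true, Bool.eq_false_iff, Ne, List.isPrefixOf_iff_prefix]
          exact h0 m hm
        simp only [pvGch, hfind]
        rw [ih rest f' (fun p hp m hm => by simpa using hno (p + 1) (by omega) m hm)
          (by simp at hkl; omega) (by omega)]
        simp [List.take_succ_cons, List.drop_succ_cons]

lemma pvRsp_opaque (m' : List Char) :
    ∀ (pre h : List Char) (f : Nat),
      (∀ p < pre.length, ¬ m' <+: ((pre ++ h).drop p)) →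
      pvRsp m' (pre.length + f) (pre ++ h) = (pre ++ (pvRsp m' f h).1, (pvRsp m' f h).2) := by
  intro pre
  induction pre with
  | nil => intro h f _; simp
  | cons c pre ih =>
    intro h f hno
    have h0 : ¬ m'.isPrefixOf (c :: (pre ++ h)) := by
      rw [Bool.not_eq_true, Bool.eq_false_iff, Ne, List.isPrefixOf_iff_prefix]
      simpa using hno 0 (Nat.succ_pos pre.length)
    have : (c :: pre).length + f = ((pre ++ h).length + f - h.length) + 1 := by simp; omega
    simp only [List.cons_append, this, pvRsp, h0, Bool.false_eq_true, if_false]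
    have : (pre ++ h).length + f - h.length = pre.length + f := by simp; omega
    rw [this, ih h f (fun p hp => by simpa using hno (p + 1) (by omega))]

-- a fixed character mismatch inside m rules out m' starting at any position of m, whatever follows
lemma pvNoPrefixAt (m' m : List Char)
    (H : ∀ p < m.length, ∃ i, i < m.length - p ∧ i < m'.length ∧ m'[i]? ≠ (m.drop p)[i]?) :
    ∀ (t : List Char), ∀ p < m.length, ¬ m' <+: ((m ++ t).drop p) := by
  intro t p hp hpre
  obtain ⟨i, hi1, hi2, hne⟩ := H p hp
  rw [List.drop_append_of_le_length (Nat.le_of_lt hp)] at hpre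
  obtain ⟨s, hs⟩ := hpre
  apply hne
  have h1 : (m.drop p ++ t)[i]? = (m.drop p)[i]? :=
    List.getElem?_append_left (by simp; omega)
  rw [← hs] at h1
  rw [← h1, List.getElem?_append_left hi2]

lemma pvSk_nil (m' : List Char) : pvSk m' [] = [[]] := by simp [pvSk, pvRsp]

lemma pvSk_opaque (m' m h : List Char) (hop : ∀ p < m.length, ¬ m' <+: ((m ++ h).drop p)) :
    pvSk m' (m ++ h) =
      (m ++ (pvRsp m' (h.length + 1) h).1) :: ((pvRsp m' (h.length + 1) h).2).map (m' ++ ·) := by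
  unfold pvSk
  have he : (m ++ h).length + 1 = m.length + (h.length + 1) := by simp; omega
  rw [he, pvRsp_opaque m' m h (h.length + 1) hop]

lemma pvSk_cons_of_not_prefix (m' : List Char) (c : Char) (h : List Char) (hnp : ¬ m' <+: (c :: h)) :
    pvSk m' (c :: h) =
      (c :: (pvRsp m' (h.length + 1) h).1) :: ((pvRsp m' (h.length + 1) h).2).map (m' ++ ·) := by
  have := pvSk_opaque m' [c] h (by
    intro p hp
    have : p = 0 := by simpa using hp
    subst this
    simpa using hnp)
  simpa using this

lemma pvSk_self_prefix (m' : List Char) (hm' : m' ≠ []) (h : List Char) :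
    pvSk m' (m' ++ h) =
      [] :: (m' ++ (pvRsp m' (h.length + 1) h).1) :: ((pvRsp m' (h.length + 1) h).2).map (m' ++ ·) := by
  cases hm : m' with
  | nil => exact absurd hm hm'
  | cons a s =>
    rw [← hm]
    have hpre : m'.isPrefixOf (m' ++ h) = true := by
      rw [List.isPrefixOf_iff_prefix]; exact List.prefix_append m' h
    have hlen : (m' ++ h).length + 1 = ((m' ++ h).length) + 1 := rfl
    have hcons : m' ++ h = a :: (s ++ h) := by rw [hm]; simp
    have hfuel : (m' ++ h).length + 1 = (s ++ h).length + 1 + 1 := by rw [hm]; simp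
    unfold pvSk
    rw [hfuel, hcons]
    have hpre' : m'.isPrefixOf (a :: (s ++ h)) = true := by rw [← hcons]; exact hpre
    simp only [pvRsp, hpre', if_true]
    have hdrop : (a :: (s ++ h)).drop m'.length = h := by
      rw [← hcons, List.drop_append_of_le_length (le_refl _)]
      simp
    rw [hdrop]
    have hstab : pvRsp m' ((s ++ h).length + 1) h = pvRsp m' (h.length + 1) h := by
      apply pvRsp_stable m' hm' <;> (simp; try omega)
    rw [hstab]
    simp

lemma pvMerge (M : List (List Char)) (m' : List Char) (hM : ∀ m ∈ M, m ≠ []) (hm' : m' ≠ [])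
    (H2 : ∀ m ∈ M, ∀ (t : List Char), ∀ p < m.length, ¬ m' <+: ((m ++ t).drop p))
    (H3 : ∀ m ∈ M, ∀ (t : List Char), ∀ p < m'.length, ¬ m <+: ((m' ++ t).drop p)) :
    ∀ (f : Nat) (l : List Char), l.length ≤ f →
      ((pvGch M f l).1 :: (pvGch M f l).2).flatMap (pvSk m') =
        (pvGch (m' :: M) f l).1 :: (pvGch (m' :: M) f l).2 := by
  have hm'1 : 1 ≤ m'.length := by
    cases hm : m' with
    | nil => exact absurd hm hm'
    | cons a s => simp
  intro f
  induction f with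
  | zero =>
    intro l hf
    have : l = [] := List.eq_nil_of_length_eq_zero (Nat.le_zero.mp hf)
    subst this
    simp [pvGch, pvSk_nil]
  | succ f ih =>
    intro l hf
    cases l with
    | nil => simp [pvGch, pvSk_nil]
    | cons c rest =>
      by_cases hm'p : m' <+: (c :: rest)
      · -- a new-marker occurrence: both sides start a fresh chunk here
        obtain ⟨d, hd⟩ := hm'p
        have hlen : m'.length + d.length = rest.length + 1 := by
          have := congrArg List.length hd
          simpa using this
        have hdlen : d.length ≤ f := by simp at hf; omega
        have hdrop : (c :: rest).drop m'.length = d := by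
          rw [← hd, List.drop_append_of_le_length (le_refl _)]
          simp
        have hskip := pvGch_skip M m'.length (c :: rest) (f + 1)
          (by
            intro p hp m hm
            rw [← hd]
            exact H3 m hm d p hp)
          (by simp; omega)
          (by simp at hf; omega)
        have htake : (c :: rest).take m'.length = m' := by
          rw [← hd, List.take_append_of_le_length (le_refl _)]
          simp
        have hstab : pvGch M (f + 1 - m'.length) d = pvGch M f d := by
          apply pvGch_stable M hM
          · simp at hf; omega
          · exact hdlen
        have hfind' : List.find? (·.isPrefixOf (c :: rest)) (m' :: M) = some m' := by
          apply List.find?_cons_of_pos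
          simp only [List.isPrefixOf_iff_prefix]
          exact ⟨d, hd⟩
        have hIH := ih d hdlen
        rw [hskip, htake, hdrop, hstab]
        simp only [pvGch, hfind', hdrop]
        simp only [List.flatMap_cons]
        rw [pvSk_self_prefix m' hm' (pvGch M f d).1]
        have hIH' := hIH
        simp only [List.flatMap_cons] at hIH'
        unfold pvSk at hIH'
        rw [List.cons_append, List.cons.injEq] at hIH'
        obtain ⟨e1, e2⟩ := hIH'
        unfold pvSk
        simp only [List.cons_append, e1, e2]
      · cases hfind : List.find? (·.isPrefixOf (c :: rest)) M with
        | some m =>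
          -- an old-marker occurrence: the m-chunk is opaque for m'
          have hmem := List.mem_of_find?_eq_some hfind
          have hpref : m <+: (c :: rest) := by
            have := List.find?_some hfind
            simpa [List.isPrefixOf_iff_prefix] using this
          have hm1 : 1 ≤ m.length := by
            cases hmc : m with
            | nil => exact absurd hmc (hM m hmem)
            | cons a s => simp
          obtain ⟨d, hd⟩ := hpref
          have hlen : m.length + d.length = rest.length + 1 := by
            have := congrArg List.length hd
            simpa using this
          have hdlen : d.length ≤ f := by simp at hf; omega
          have hdrop : (c :: rest).drop m.length = d := by
            rw [← hd, List.drop_append_of_le_length (le_refl _)]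
            simp
          have hfind' : List.find? (·.isPrefixOf (c :: rest)) (m' :: M) = some m := by
            rw [List.find?_cons_of_neg, hfind]
            simp only [List.isPrefixOf_iff_prefix]
            exact hm'p
          have hIH := ih d hdlen
          simp only [pvGch, hfind, hfind', hdrop]
          simp only [List.flatMap_cons]
          rw [pvSk_nil, pvSk_opaque m' m (pvGch M f d).1 (fun p hp => H2 m hmem (pvGch M f d).1 p hp)]
          have hIH' := hIH
          simp only [List.flatMap_cons] at hIH'
          unfold pvSk at hIH'
          rw [List.cons_append, List.cons.injEq] at hIH'
          obtain ⟨e1, e2⟩ := hIH'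
          unfold pvSk
          simp only [List.cons_append, List.nil_append, e1, e2]
        | none =>
          -- no marker here: both sides copy c into the current chunk
          have hrlen : rest.length ≤ f := by simp at hf; omega
          have hfind' : List.find? (·.isPrefixOf (c :: rest)) (m' :: M) = none := by
            rw [List.find?_cons_of_neg, hfind]
            simp only [List.isPrefixOf_iff_prefix]
            exact hm'p
          have hIH := ih rest hrlen
          simp only [pvGch, hfind, hfind']
          simp only [List.flatMap_cons]
          have hcp : (c :: (pvGch M f rest).1) <+: (c :: rest) :=
            List.cons_prefix_cons.mpr ⟨rfl, pvGch_fst_prefix M f rest⟩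
          have hnp : ¬ m' <+: (c :: (pvGch M f rest).1) := fun hx => hm'p (hx.trans hcp)
          rw [pvSk_cons_of_not_prefix m' c (pvGch M f rest).1 hnp]
          have hIH' := hIH
          simp only [List.flatMap_cons] at hIH'
          unfold pvSk at hIH'
          rw [List.cons_append, List.cons.injEq] at hIH'
          obtain ⟨e1, e2⟩ := hIH'
          unfold pvSk
          simp only [List.cons_append, e1, e2]

lemma pvScan_eq (f : Nat) :
    ∀ (l cur : List Char) (res : List (List Char)), l.length ≤ f →
      pvScan l cur res =
        res ++ (cur ++ (pvGch [pvSubsub, pvSub, pvSec] f l).1) :: (pvGch [pvSubsub, pvSub, pvSec] f l).2 := by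
  induction f with
  | zero =>
    intro l cur res hf
    have : l = [] := List.eq_nil_of_length_eq_zero (Nat.le_zero.mp hf)
    subst this
    simp [pvScan, pvGch]
  | succ f ih =>
    intro l cur res hf
    cases l with
    | nil => simp [pvScan, pvGch]
    | cons c rest =>
      have hr : rest.length ≤ f := by simp at hf; omega
      by_cases h3 : pvSubsub.isPrefixOf (c :: rest)
      · have hfind : List.find? (·.isPrefixOf (c :: rest)) [pvSubsub, pvSub, pvSec] = some pvSubsub :=
          List.find?_cons_of_pos h3
        simp only [pvScan, PySem.Chars.startswith, h3, if_true, pvGch, hfind]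
        rw [ih (rest.drop 13) pvSubsub (res ++ [cur]) (by simp; omega)]
        have : (c :: rest).drop pvSubsub.length = rest.drop 13 := by simp [pvSubsub]
        rw [this]
        simp
      · by_cases h2 : pvSub.isPrefixOf (c :: rest)
        · have hfind : List.find? (·.isPrefixOf (c :: rest)) [pvSubsub, pvSub, pvSec] = some pvSub := by
            rw [List.find?_cons_of_neg (by simpa using h3)]
            exact List.find?_cons_of_pos h2
          simp only [pvScan, PySem.Chars.startswith, h3, h2, if_true, Bool.false_eq_true, if_false,
            pvGch, hfind]
          rw [ih (rest.drop 10) pvSub (res ++ [cur]) (by simp; omega)]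
          have : (c :: rest).drop pvSub.length = rest.drop 10 := by simp [pvSub]
          rw [this]
          simp
        · by_cases h1 : pvSec.isPrefixOf (c :: rest)
          · have hfind : List.find? (·.isPrefixOf (c :: rest)) [pvSubsub, pvSub, pvSec] = some pvSec := by
              rw [List.find?_cons_of_neg (by simpa using h3), List.find?_cons_of_neg (by simpa using h2)]
              exact List.find?_cons_of_pos h1
            simp only [pvScan, PySem.Chars.startswith, h3, h2, h1, if_true, Bool.false_eq_true,
              if_false, pvGch, hfind]
            rw [ih (rest.drop 7) pvSec (res ++ [cur]) (by simp; omega)]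
            have : (c :: rest).drop pvSec.length = rest.drop 7 := by simp [pvSec]
            rw [this]
            simp
          · have hfind : List.find? (·.isPrefixOf (c :: rest)) [pvSubsub, pvSub, pvSec] = none := by
              rw [List.find?_cons_of_neg (by simpa using h3), List.find?_cons_of_neg (by simpa using h2)]
              exact List.find?_cons_of_neg (by simpa using h1)
            simp only [pvScan, PySem.Chars.startswith, h3, h2, h1, Bool.false_eq_true, if_false,
              pvGch, hfind]
            rw [ih rest (cur ++ [c]) res hr]
            simp

-- ===== VERDICT (by name: the statement is the Claim_ definition above) =====
lemma pvSk_gch (m : List Char) (hm : m ≠ []) (l : List Char) :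
    pvSk m l = (pvGch [m] l.length l).1 :: (pvGch [m] l.length l).2 := by
  rw [pvGch_single]
  unfold pvSk
  rw [pvRsp_stable m hm (l.length + 1) l.length l (by omega) (le_refl _)]

theorem split_tex_into_subsubsections_spec : Claim_equal_split_tex_into_subsubsections := by
  intro contents _
  unfold Spec_split_tex_into_subsubsections
  unfold split_tex_into_subsubsections split_tex_into_subsubsections_alt
  dsimp only
  rw [pvStc_eq]
  rw [PySem.List.foldl_append_eq_flatMap, PySem.List.foldl_append_eq_flatMap]
  simp only [pvStc_eq, List.nil_append]
  rw [pvSk_gch pvSec (by decide) contents.toList]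
  rw [pvMerge [pvSec] pvSub (by intro m hm; simp at hm; subst hm; decide) (by decide)
      (by
        intro m hm
        simp at hm
        subst hm
        exact pvNoPrefixAt pvSub pvSec (by decide))
      (by
        intro m hm
        simp at hm
        subst hm
        exact pvNoPrefixAt pvSec pvSub (by decide))
      contents.toList.length contents.toList (le_refl _)]
  rw [pvMerge [pvSub, pvSec] pvSubsub
      (by intro m hm; simp at hm; rcases hm with h | h <;> (subst h; decide)) (by decide)
      (by
        intro m hm
        simp at hm
        rcases hm with h | h
        · subst h; exact pvNoPrefixAt pvSubsub pvSub (by decide)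
        · subst h; exact pvNoPrefixAt pvSubsub pvSec (by decide))
      (by
        intro m hm
        simp at hm
        rcases hm with h | h
        · subst h; exact pvNoPrefixAt pvSub pvSubsub (by decide)
        · subst h; exact pvNoPrefixAt pvSec pvSubsub (by decide))
      contents.toList.length contents.toList (le_refl _)]
  rw [pvScan_eq contents.toList.length contents.toList [] [] (le_refl _)]
  simp
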